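-- pv_equiv track=rewrite | github.com/bhargavtumati/VisualStudioCode | deliciousbanquet.py | maximumDeliciousness
-- ===== SOURCE A (Python) =====
-- def prefix_or(arr):
--     n = len(arr)
--     prefix = [0] * (n + 1)
--     prefix[1] = arr[0]
--     for i in range(2, n + 1):
--         prefix[i] = prefix[i - 1] | arr[i - 1]
--     return prefix
--
-- def suffix_or(arr):
--     n = len(arr)
--     suffix = [0] * (n + 1)
--     suffix[n - 1] = arr[n - 1]
--     for i in range(n - 2, -1, -1):
--         suffix[i] = suffix[i + 1] | arr[i]
--     return suffix
--
-- def maximumDeliciousness(nums, k):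
--     n = len(nums)
--     prefor = prefix_or(nums)
--     suffor = suffix_or(nums)
--     ans = 0
--     for i in range(n):
--         er = prefor[i] | suffor[i + 1]
--         power = (2 ** k) * nums[i]
--         tans = er | power
--         ans = max(ans, tans)
--     return ans
-- ===== SOURCE B (Python) =====
-- def maximumDeliciousness(nums, k):
--     scale = 2 ** k
--     total = 0   # OR of all elements seen
--     twice = 0   # bits set in at least two elements
--     for x in nums:
--         twice |= total & x
--         total |= x
--     ans = 0
--     for x in nums:
--         er = twice | (total & ~x)   # OR of all elements except one occurrence of x
--         ans = max(ans, er | scale * x)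
--     return ans
-- ===== Notes on version B (the rewrite author's own statement) =====
-- stated objective: faster
-- what changed: Replaces A's prefix-OR and suffix-OR arrays (two helper passes building n+1-element lists, then an indexed loop) with two constant-space passes keeping only `total` (OR of all elements) and `twice` (bits set in at least two elements); the OR of all elements except x is reconstructed as twice | (total & ~x).
import Mathlib
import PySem

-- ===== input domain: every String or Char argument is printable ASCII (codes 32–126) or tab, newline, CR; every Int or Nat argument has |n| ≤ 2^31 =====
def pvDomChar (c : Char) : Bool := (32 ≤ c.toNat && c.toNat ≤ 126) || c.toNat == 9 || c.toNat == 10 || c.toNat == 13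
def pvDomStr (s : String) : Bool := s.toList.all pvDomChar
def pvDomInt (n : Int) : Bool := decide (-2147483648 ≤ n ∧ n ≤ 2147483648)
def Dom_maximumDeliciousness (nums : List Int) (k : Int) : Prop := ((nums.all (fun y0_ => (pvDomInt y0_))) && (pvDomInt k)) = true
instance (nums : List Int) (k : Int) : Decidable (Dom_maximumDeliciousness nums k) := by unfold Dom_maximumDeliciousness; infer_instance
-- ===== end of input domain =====

-- B replaces A's prefix/suffix OR arrays by two O(1)-state passes: `total` (OR of all) and
-- `twice` (bits set in ≥ 2 elements); the OR of all elements but one is twice | (total & ~x).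

-- ===== PORT A =====
def prefixOrA (arr : List Int) : List Int :=
  let n := arr.length
  let pre0 := List.replicate (n + 1) (0 : Int)
  let pre1 := pre0.set 1 (PySem.List.pyGetD arr 0 0)   -- prefix[1] = arr[0]; in range under Pre_ (arr ≠ [])
  (PySem.List.pyRange 2 ((n : Int) + 1) 1).foldl
    (fun pre i => pre.set i.toNat
      (PySem.Int.bor (PySem.List.pyGetD pre (i - 1) 0) (PySem.List.pyGetD arr (i - 1) 0))) pre1

def suffixOrA (arr : List Int) : List Int :=
  let n := arr.length
  let suf0 := List.replicate (n + 1) (0 : Int)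
  let suf1 := suf0.set (n - 1) (PySem.List.pyGetD arr ((n : Int) - 1) 0)   -- suffix[n-1] = arr[n-1]; in range under Pre_
  (PySem.List.pyRange ((n : Int) - 2) (-1) (-1)).foldl
    (fun suf i => suf.set i.toNat
      (PySem.Int.bor (PySem.List.pyGetD suf (i + 1) 0) (PySem.List.pyGetD arr i 0))) suf1

def maximumDeliciousness (nums : List Int) (k : Int) : Int :=
  let n := nums.length
  let prefor := prefixOrA nums
  let suffor := suffixOrA nums
  (PySem.List.pyRange 0 (n : Int) 1).foldl
    (fun ans i =>
      let er := PySem.Int.bor (PySem.List.pyGetD prefor i 0) (PySem.List.pyGetD suffor (i + 1) 0)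
      let power := 2 ^ k.toNat * PySem.List.pyGetD nums i 0   -- 2 ** k: exact for 0 ≤ k (Pre_)
      let tans := PySem.Int.bor er power
      max ans tans) 0

-- ===== PORT B =====
def maximumDeliciousness_alt (nums : List Int) (k : Int) : Int :=
  let scale : Int := 2 ^ k.toNat                       -- 2 ** k: exact for 0 ≤ k (Pre_)
  let tt := nums.foldl
    (fun (p : Int × Int) x => (PySem.Int.bor p.1 (PySem.Int.band p.2 x), PySem.Int.bor p.2 x))
    ((0 : Int), (0 : Int))                             -- (twice, total)
  nums.foldl (fun ans x =>
    let er := PySem.Int.bor tt.1 (PySem.Int.band tt.2 (Int.not x))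
    max ans (PySem.Int.bor er (scale * x))) 0

-- ===== PRECONDITION & SPEC =====
-- Pre_ excludes nums = [] (A raises IndexError in prefix_or) and k < 0 (2**k is a float, so
-- `er | power` raises TypeError); on every other input A returns normally.
def Pre_maximumDeliciousness (nums : List Int) (k : Int) : Prop := nums ≠ [] ∧ 0 ≤ k
instance (nums : List Int) (k : Int) : Decidable (Pre_maximumDeliciousness nums k) := by
  unfold Pre_maximumDeliciousness; infer_instance

def pvWitness_maximumDeliciousness : List Int × Int := ([1, 2], 1)

def Spec_maximumDeliciousness (nums : List Int) (k : Int) (out : Int) : Prop := out = maximumDeliciousness_alt nums k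
instance (nums : List Int) (k : Int) (out : Int) : Decidable (Spec_maximumDeliciousness nums k out) := by unfold Spec_maximumDeliciousness; infer_instance

-- ===== CLAIM (what is proved, stated in full; the proofs are below) =====
def Claim_equal_maximumDeliciousness : Prop := ∀ (nums : List Int) (k : Int), Dom_maximumDeliciousness nums k → Pre_maximumDeliciousness nums k → Spec_maximumDeliciousness nums k (maximumDeliciousness nums k)

-- ===== LEMMAS AND PROOFS =====

-- abbreviations for the proofs (OR of a prefix / suffix; B's (twice, total) state; per-bit count)
def orT (xs : List Int) : Int := xs.foldl PySem.Int.bor 0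
def orS (xs : List Int) : Int := xs.foldr (fun x acc => PySem.Int.bor acc x) 0
def ttOf (xs : List Int) : Int × Int :=
  xs.foldl (fun (p : Int × Int) x => (PySem.Int.bor p.1 (PySem.Int.band p.2 x), PySem.Int.bor p.2 x))
    ((0 : Int), (0 : Int))
def cntB (xs : List Int) (b : ℕ) : ℕ := xs.countP (fun x => x.testBit b)

theorem int_ext {a b : Int} (h : ∀ n, a.testBit n = b.testBit n) : a = b := by
  have big : ∀ m i : ℕ, m < i → Nat.testBit m i = false := by
    intro m i hmi
    exact Nat.testBit_eq_false_of_lt (lt_of_lt_of_le (Nat.lt_two_pow_self)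
      (Nat.pow_le_pow_right (by omega) (by omega)))
  cases a with
  | ofNat m =>
    cases b with
    | ofNat n =>
      have := Nat.eq_of_testBit_eq (x := m) (y := n) (fun i => by simpa [Int.testBit] using h i)
      simp [this]
    | negSucc n =>
      exfalso
      have hi := h (m + n + 1)
      simp [Int.testBit, big m (m+n+1) (by omega), big n (m+n+1) (by omega)] at hi
  | negSucc m =>
    cases b with
    | ofNat n =>
      exfalso
      have hi := h (m + n + 1)
      simp [Int.testBit, big m (m+n+1) (by omega), big n (m+n+1) (by omega)] at hi
    | negSucc n =>
      have := Nat.eq_of_testBit_eq (x := m) (y := n) (fun i => by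
        have hi := h i
        simp [Int.testBit] at hi
        exact hi)
      simp [this]

theorem land_add_ldiff (n m : ℕ) : (n &&& m) + n.ldiff m = n := by
  induction n using Nat.binaryRec generalizing m with
  | zero =>
    have h1 : 0 &&& m = 0 := by simp
    have h2 : Nat.ldiff 0 m = 0 := by
      apply Nat.eq_of_testBit_eq; intro i; simp [Nat.testBit_ldiff]
    simp [h1, h2]
  | bit b n ih =>
    have hm : Nat.bit m.bodd m.div2 = m := Nat.bit_bodd_div2 m
    rw [← hm, Nat.land_bit, Nat.ldiff_bit]
    have := ih m.div2
    cases b <;> cases hb : m.bodd <;>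
      simp [Nat.bit, hb] <;> omega

theorem sub_land_eq_ldiff (n m : ℕ) : n - (n &&& m) = n.ldiff m := by
  have := land_add_ldiff n m; omega

theorem pybor_eq_lor (a b : Int) : PySem.Int.bor a b = Int.lor a b := by
  cases a with
  | ofNat m =>
    cases b with
    | ofNat n => simp [PySem.Int.bor, Int.lor]
    | negSucc n =>
      have h1 : ¬ (0 : Int) ≤ Int.negSucc n := by omega
      have h2 : (-(Int.negSucc n) - 1).toNat = n := by
        rw [Int.negSucc_eq]; omega
      simp [PySem.Int.bor, Int.lor, h1, h2, Int.negSucc_eq, sub_land_eq_ldiff]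
      rw [if_neg (by omega)]; ring
  | negSucc m =>
    have h1 : ¬ (0 : Int) ≤ Int.negSucc m := by omega
    have h2 : (-(Int.negSucc m) - 1).toNat = m := by rw [Int.negSucc_eq]; omega
    cases b with
    | ofNat n =>
      simp [PySem.Int.bor, Int.lor, h1, h2, Int.negSucc_eq, sub_land_eq_ldiff]
      rw [if_neg (by omega)]; ring
    | negSucc n =>
      have h3 : ¬ (0 : Int) ≤ Int.negSucc n := by omega
      have h4 : (-(Int.negSucc n) - 1).toNat = n := by rw [Int.negSucc_eq]; omega
      simp [PySem.Int.bor, Int.lor, h1, h2, h3, h4, Int.negSucc_eq]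
      split_ifs <;> omega

theorem pyband_eq_land (a b : Int) : PySem.Int.band a b = Int.land a b := by
  cases a with
  | ofNat m =>
    cases b with
    | ofNat n => simp [PySem.Int.band, Int.land]
    | negSucc n =>
      have h1 : ¬ (0 : Int) ≤ Int.negSucc n := by omega
      have h2 : (-(Int.negSucc n) - 1).toNat = n := by rw [Int.negSucc_eq]; omega
      simp [PySem.Int.band, Int.land, h1, h2, sub_land_eq_ldiff]
  | negSucc m =>
    have h1 : ¬ (0 : Int) ≤ Int.negSucc m := by omega
    have h2 : (-(Int.negSucc m) - 1).toNat = m := by rw [Int.negSucc_eq]; omega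
    cases b with
    | ofNat n =>
      simp [PySem.Int.band, Int.land, h1, h2]
      exact sub_land_eq_ldiff n m
    | negSucc n =>
      have h3 : ¬ (0 : Int) ≤ Int.negSucc n := by omega
      have h4 : (-(Int.negSucc n) - 1).toNat = n := by rw [Int.negSucc_eq]; omega
      simp [PySem.Int.band, Int.land, h1, h2, h3, h4, Int.negSucc_eq]
      split_ifs <;> omega

theorem pynot_eq_lnot (a : Int) : Int.not a = Int.lnot a := by
  cases a <;> rfl

theorem tb_bor (a b : Int) (n : ℕ) :
    (PySem.Int.bor a b).testBit n = (a.testBit n || b.testBit n) := by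
  rw [pybor_eq_lor]; exact Int.testBit_lor a b n

theorem tb_band (a b : Int) (n : ℕ) :
    (PySem.Int.band a b).testBit n = (a.testBit n && b.testBit n) := by
  rw [pyband_eq_land]; exact Int.testBit_land a b n

theorem tb_not (a : Int) (n : ℕ) : (Int.not a).testBit n = !a.testBit n := by
  rw [pynot_eq_lnot]; exact Int.testBit_lnot a n

theorem tb_zero (n : ℕ) : (0 : Int).testBit n = false := by simp [Int.testBit]

theorem tb_foldl_bor (b : ℕ) : ∀ (xs : List Int) (a : Int),
    (xs.foldl PySem.Int.bor a).testBit b = (a.testBit b || xs.any (fun x => x.testBit b)) := by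
  intro xs
  induction xs with
  | nil => simp
  | cons x l ih =>
    intro a
    simp only [List.foldl_cons, List.any_cons, ih, tb_bor]
    cases a.testBit b <;> cases x.testBit b <;> simp

theorem tb_orT (xs : List Int) (b : ℕ) :
    (orT xs).testBit b = xs.any (fun x => x.testBit b) := by
  simp [orT, tb_foldl_bor, tb_zero]

theorem tb_orS (xs : List Int) (b : ℕ) :
    (orS xs).testBit b = xs.any (fun x => x.testBit b) := by
  induction xs with
  | nil => simp [orS, tb_zero]
  | cons x l ih => simp [orS, tb_bor] at ih ⊢; cases x.testBit b <;> simp [ih, Bool.or_comm]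

theorem ttOf_foldl_snd (xs : List Int) (t tot : Int) :
    (xs.foldl (fun (p : Int × Int) x => (PySem.Int.bor p.1 (PySem.Int.band p.2 x), PySem.Int.bor p.2 x)) (t, tot)).2
      = xs.foldl PySem.Int.bor tot := by
  induction xs generalizing t tot with
  | nil => rfl
  | cons x l ih => simp [List.foldl_cons, ih]

theorem ttOf_snd (xs : List Int) : (ttOf xs).2 = orT xs := ttOf_foldl_snd xs 0 0

theorem any_eq_cnt (xs : List Int) (b : ℕ) :
    xs.any (fun x => x.testBit b) = decide (1 ≤ cntB xs b) := by
  induction xs with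
  | nil => simp [cntB]
  | cons x l ih =>
    simp only [List.any_cons, cntB, List.countP_cons] at ih ⊢
    cases hx : x.testBit b <;> rw [Bool.eq_iff_iff] <;> simp [hx, ih] <;> omega

theorem tb_tt_fst (b : ℕ) : ∀ (xs : List Int) (t tot : Int),
    ((xs.foldl (fun (p : Int × Int) x => (PySem.Int.bor p.1 (PySem.Int.band p.2 x), PySem.Int.bor p.2 x)) (t, tot)).1).testBit b
      = (t.testBit b || (tot.testBit b && xs.any (fun x => x.testBit b)) || decide (2 ≤ cntB xs b)) := by
  intro xs
  induction xs with
  | nil => simp [cntB]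
  | cons x l ih =>
    intro t tot
    simp only [List.foldl_cons, ih, tb_bor, tb_band, List.any_cons, cntB, List.countP_cons,
      any_eq_cnt]
    cases ht : t.testBit b <;> cases htot : tot.testBit b <;> cases hx : x.testBit b <;>
      rw [Bool.eq_iff_iff] <;> simp [cntB] <;>
      first
        | omega
        | (intro h; exact List.countP_pos_iff.mp (by omega))

theorem cntB_split (xs : List Int) (j : ℕ) (hj : j < xs.length) (b : ℕ) :
    cntB xs b = cntB (xs.take j) b + (if xs[j].testBit b then 1 else 0) + cntB (xs.drop (j + 1)) b := by
  have hxs : xs = xs.take j ++ xs[j] :: xs.drop (j + 1) := by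
    conv_lhs => rw [← List.take_append_drop j xs]
    rw [List.drop_eq_getElem_cons hj]
  calc cntB xs b = cntB (xs.take j ++ xs[j] :: xs.drop (j + 1)) b := by rw [← hxs]
    _ = _ := by
        simp only [cntB, List.countP_append, List.countP_cons]
        cases h : xs[j].testBit b <;> simp [h] <;> omega

theorem core_identity (xs : List Int) (j : ℕ) (hj : j < xs.length) :
    PySem.Int.bor (orT (xs.take j)) (orS (xs.drop (j + 1)))
      = PySem.Int.bor (ttOf xs).1 (PySem.Int.band (ttOf xs).2 (Int.not xs[j])) := by
  apply int_ext
  intro b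
  rw [tb_bor, tb_bor, tb_band, tb_not, tb_orT, tb_orS, ttOf_snd, tb_orT]
  have htt1 : (ttOf xs).1.testBit b = decide (2 ≤ cntB xs b) := by
    have := tb_tt_fst b xs 0 0
    simpa [ttOf, tb_zero] using this
  rw [htt1, any_eq_cnt, any_eq_cnt, any_eq_cnt]
  have hs := cntB_split xs j hj b
  rw [Bool.eq_iff_iff]
  cases hb : xs[j].testBit b <;> simp [hb] at hs ⊢ <;> omega

theorem orT_take_succ (xs : List Int) (j : ℕ) (hj : j < xs.length) :
    orT (xs.take (j + 1)) = PySem.Int.bor (orT (xs.take j)) xs[j] := by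
  have h : xs.take (j + 1) = xs.take j ++ [xs[j]] := by
    rw [List.take_add_one, List.getElem?_eq_getElem hj]; rfl
  rw [orT, orT, h, List.foldl_append]
  rfl

theorem orS_drop_eq (xs : List Int) (j : ℕ) (hj : j < xs.length) :
    orS (xs.drop j) = PySem.Int.bor (orS (xs.drop (j + 1))) xs[j] := by
  rw [List.drop_eq_getElem_cons hj]
  rfl

theorem bor_zero_left (x : Int) : PySem.Int.bor 0 x = x := by
  rw [PySem.Int.bor_comm]; exact PySem.Int.bor_zero x

-- intermediate prefix state after the entries below m have been written

-- intermediate prefix state after the entries below m have been written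
def preSt (xs : List Int) (m : ℕ) : List Int :=
  (List.range (xs.length + 1)).map (fun j => if j < m then orT (xs.take j) else 0)

theorem preSt_len (xs : List Int) (m : ℕ) : (preSt xs m).length = xs.length + 1 := by
  simp [preSt]

theorem pyGetD_preSt (xs : List Int) (m t : ℕ) (ht : t < xs.length + 1) :
    PySem.List.pyGetD (preSt xs m) (t : Int) 0 = if t < m then orT (xs.take t) else 0 := by
  rw [PySem.List.pyGetD_natCast]
  rw [List.getD_eq_getElem?_getD, List.getElem?_eq_getElem (by simpa [preSt_len] using ht)]
  simp [preSt]

theorem stepPre (xs : List Int) (m : ℕ) (h2 : 2 ≤ m) (hm : m ≤ xs.length) :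
    (preSt xs m).set m
      (PySem.Int.bor (PySem.List.pyGetD (preSt xs m) ((m : Int) - 1) 0)
        (PySem.List.pyGetD xs ((m : Int) - 1) 0))
      = preSt xs (m + 1) := by
  have hc : ((m : Int) - 1) = ((m - 1 : ℕ) : Int) := by omega
  have hread1 : PySem.List.pyGetD (preSt xs m) ((m : Int) - 1) 0 = orT (xs.take (m - 1)) := by
    rw [hc, pyGetD_preSt xs m (m - 1) (by omega), if_pos (by omega)]
  have hread2 : PySem.List.pyGetD xs ((m : Int) - 1) 0 = xs[m - 1]'(by omega) := by
    rw [hc, PySem.List.pyGetD_natCast, List.getD_eq_getElem?_getD,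
      List.getElem?_eq_getElem (by omega)]
    rfl
  have hval : PySem.Int.bor (orT (xs.take (m - 1))) (xs[m - 1]'(by omega)) = orT (xs.take m) := by
    have := orT_take_succ xs (m - 1) (by omega)
    rw [show m - 1 + 1 = m by omega] at this
    rw [← this]
  rw [hread1, hread2, hval]
  apply List.ext_getElem
  · simp [preSt]
  · intro t h1 h2'
    simp only [List.getElem_set, preSt, List.getElem_map, List.getElem_range]
    have ht : t < xs.length + 1 := by simpa [preSt_len] using h1
    by_cases htm : t = m
    · subst htm
      simp
    · rw [if_neg (by omega)]
      by_cases hlt : t < m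
      · rw [if_pos hlt, if_pos (by omega)]
      · rw [if_neg hlt, if_neg (by omega)]

theorem loopPre (xs : List Int) :
    ∀ m : ℕ, 2 ≤ m → m ≤ xs.length + 1 →
    (PySem.List.pyRange 2 (m : Int) 1).foldl
      (fun pre i => pre.set i.toNat
        (PySem.Int.bor (PySem.List.pyGetD pre (i - 1) 0) (PySem.List.pyGetD xs (i - 1) 0)))
      (preSt xs 2)
      = preSt xs m := by
  intro m
  induction m with
  | zero => omega
  | succ m ih =>
    intro h2 hm
    by_cases hbase : m + 1 = 2
    · rw [hbase]
      rw [PySem.List.pyRange_one_eq_nil (by omega)]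
      rfl
    · have h2m : 2 ≤ m := by omega
      have : ((m + 1 : ℕ) : Int) = (m : Int) + 1 := by push_cast; ring
      rw [this, PySem.List.pyRange_one_succ_right (by omega), List.foldl_append, ih h2m (by omega)]
      simp only [List.foldl_cons, List.foldl_nil]
      have : ((m : Int)).toNat = m := by omega
      rw [this, stepPre xs m h2m (by omega)]

theorem prefixOrA_eq (xs : List Int) (hx : xs ≠ []) :
    prefixOrA xs = (List.range (xs.length + 1)).map (fun j => orT (xs.take j)) := by
  have hn : 1 ≤ xs.length := List.length_pos_iff.mpr hx
  have hinit : (List.replicate (xs.length + 1) (0 : Int)).set 1 (PySem.List.pyGetD xs 0 0)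
      = preSt xs 2 := by
    have hget : PySem.List.pyGetD xs 0 0 = xs[0]'(by omega) := by
      rw [PySem.List.pyGetD_zero, List.getD_eq_getElem?_getD, List.getElem?_eq_getElem (by omega)]
      rfl
    apply List.ext_getElem
    · simp [preSt]
    · intro t h1 h2
      simp only [List.getElem_set, List.getElem_replicate, preSt, List.getElem_map,
        List.getElem_range]
      by_cases ht1 : t = 1
      · subst ht1
        rw [if_pos rfl, if_pos (by omega), hget]
        have := orT_take_succ xs 0 (by omega)
        simp [orT] at this ⊢
        rw [this, bor_zero_left]
      · rw [if_neg (by omega)]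
        by_cases ht0 : t = 0
        · subst ht0; rw [if_pos (by omega)]; simp [orT]
        · rw [if_neg (by omega)]
  have := loopPre xs (xs.length + 1) (by omega) (by omega)
  unfold prefixOrA
  simp only []
  rw [show ((xs.length : Int) + 1) = ((xs.length + 1 : ℕ) : Int) by push_cast; ring]
  rw [hinit, this]
  unfold preSt
  apply List.map_congr_left
  intro j hj
  rw [if_pos (by simpa using List.mem_range.mp hj)]

-- intermediate suffix state: entries from a upward written
def sufSt (xs : List Int) (a : ℕ) : List Int :=
  (List.range (xs.length + 1)).map (fun j => if a ≤ j then orS (xs.drop j) else 0)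

theorem sufSt_len (xs : List Int) (a : ℕ) : (sufSt xs a).length = xs.length + 1 := by
  simp [sufSt]

theorem pyGetD_sufSt (xs : List Int) (a t : ℕ) (ht : t < xs.length + 1) :
    PySem.List.pyGetD (sufSt xs a) (t : Int) 0 = if a ≤ t then orS (xs.drop t) else 0 := by
  rw [PySem.List.pyGetD_natCast]
  rw [List.getD_eq_getElem?_getD, List.getElem?_eq_getElem (by simpa [sufSt_len] using ht)]
  simp [sufSt]

theorem stepSuf (xs : List Int) (a : ℕ) (ha : a < xs.length) :
    (sufSt xs (a + 1)).set a
      (PySem.Int.bor (PySem.List.pyGetD (sufSt xs (a + 1)) ((a : Int) + 1) 0)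
        (PySem.List.pyGetD xs (a : Int) 0))
      = sufSt xs a := by
  have hread1 : PySem.List.pyGetD (sufSt xs (a + 1)) ((a : Int) + 1) 0 = orS (xs.drop (a + 1)) := by
    rw [show ((a : Int) + 1) = ((a + 1 : ℕ) : Int) by push_cast; ring,
      pyGetD_sufSt xs (a + 1) (a + 1) (by omega), if_pos (by omega)]
  have hread2 : PySem.List.pyGetD xs (a : Int) 0 = xs[a]'ha := by
    rw [PySem.List.pyGetD_natCast, List.getD_eq_getElem?_getD, List.getElem?_eq_getElem ha]
    rfl
  rw [hread1, hread2, ← orS_drop_eq xs a ha]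
  apply List.ext_getElem
  · simp [sufSt]
  · intro t h1 h2
    simp only [List.getElem_set, sufSt, List.getElem_map, List.getElem_range]
    by_cases hta : a = t
    · subst hta; simp
    · rw [if_neg hta]
      by_cases hle : a + 1 ≤ t
      · rw [if_pos hle, if_pos (by omega)]
      · rw [if_neg hle, if_neg (by omega)]

theorem loopSuf (xs : List Int) :
    ∀ a : ℕ, a + 1 ≤ xs.length →
    (PySem.List.pyRange ((a : Int) - 1) (-1) (-1)).foldl
      (fun suf i => suf.set i.toNat
        (PySem.Int.bor (PySem.List.pyGetD suf (i + 1) 0) (PySem.List.pyGetD xs i 0)))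
      (sufSt xs a)
      = sufSt xs 0 := by
  intro a
  induction a with
  | zero =>
    intro _
    rw [PySem.List.pyRange_neg_one_eq_nil (by omega)]
    rfl
  | succ a ih =>
    intro ha
    rw [show (((a + 1 : ℕ) : Int) - 1) = (a : Int) by push_cast; ring,
      PySem.List.pyRange_neg_one_cons (by omega)]
    simp only [List.foldl_cons]
    rw [show ((a : Int)).toNat = a by omega, stepSuf xs a (by omega), ih (by omega)]

theorem suffixOrA_eq (xs : List Int) (hx : xs ≠ []) :
    suffixOrA xs = (List.range (xs.length + 1)).map (fun j => orS (xs.drop j)) := by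
  have hn : 1 ≤ xs.length := List.length_pos_iff.mpr hx
  have hinit : (List.replicate (xs.length + 1) (0 : Int)).set (xs.length - 1)
      (PySem.List.pyGetD xs ((xs.length : Int) - 1) 0) = sufSt xs (xs.length - 1) := by
    have hget : PySem.List.pyGetD xs ((xs.length : Int) - 1) 0 = xs[xs.length - 1]'(by omega) := by
      rw [show ((xs.length : Int) - 1) = ((xs.length - 1 : ℕ) : Int) by omega,
        PySem.List.pyGetD_natCast, List.getD_eq_getElem?_getD,
        List.getElem?_eq_getElem (by omega)]
      rfl
    apply List.ext_getElem
    · simp [sufSt]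
    · intro t h1 h2
      simp only [List.getElem_set, List.getElem_replicate, sufSt, List.getElem_map,
        List.getElem_range]
      have ht : t < xs.length + 1 := by simpa [sufSt_len] using h2
      by_cases hteq : xs.length - 1 = t
      · rw [if_pos hteq, if_pos (by omega), hget, ← hteq]
        have := orS_drop_eq xs (xs.length - 1) (by omega)
        rw [show xs.length - 1 + 1 = xs.length by omega] at this
        rw [this, List.drop_length]
        show _ = PySem.Int.bor (orS []) _
        rw [show orS [] = 0 from rfl, bor_zero_left]
      · rw [if_neg hteq]
        by_cases hge : xs.length - 1 ≤ t
        · -- then t = xs.length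
          have hteq2 : t = xs.length := by omega
          rw [if_pos (by omega), hteq2, List.drop_length]
          rfl
        · rw [if_neg (by omega)]
  have hloop := loopSuf xs (xs.length - 1) (by omega)
  unfold suffixOrA
  simp only []
  rw [show ((xs.length : Int) - 2) = (((xs.length - 1 : ℕ) : Int) - 1) by omega]
  rw [hinit, hloop]
  unfold sufSt
  apply List.map_congr_left
  intro j hj
  rw [if_pos (by omega)]

theorem pyGetD_map_range' (f : ℕ → Int) (N j : ℕ) (hj : j < N) :
    PySem.List.pyGetD ((List.range N).map f) ((j : ℕ) : Int) 0 = f j := by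
  rw [PySem.List.pyGetD_natCast, List.getD_eq_getElem?_getD,
    List.getElem?_eq_getElem (by simpa using hj)]
  simp

theorem main_eq (nums : List Int) (k : Int) (hx : nums ≠ []) :
    maximumDeliciousness nums k = maximumDeliciousness_alt nums k := by
  have hB : maximumDeliciousness_alt nums k
      = nums.foldl (fun ans x =>
          max ans (PySem.Int.bor
            (PySem.Int.bor (ttOf nums).1 (PySem.Int.band (ttOf nums).2 (Int.not x)))
            (2 ^ k.toNat * x))) 0 := rfl
  unfold maximumDeliciousness
  simp only []
  rw [prefixOrA_eq nums hx, suffixOrA_eq nums hx]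
  rw [PySem.List.foldl_congr_mem _ _
    (fun ans i =>
      max ans (PySem.Int.bor
        (PySem.Int.bor (ttOf nums).1 (PySem.Int.band (ttOf nums).2 (Int.not (PySem.List.pyGetD nums i 0))))
        (2 ^ k.toNat * PySem.List.pyGetD nums i 0))) 0 ?_]
  · rw [PySem.List.foldl_pyRange_zero_pyGetD' nums 0
      (fun ans x =>
        max ans (PySem.Int.bor
          (PySem.Int.bor (ttOf nums).1 (PySem.Int.band (ttOf nums).2 (Int.not x)))
          (2 ^ k.toNat * x))) 0]
    rw [hB]
  · intro acc i hi
    obtain ⟨h0, hlt⟩ := (PySem.List.mem_pyRange_one).mp hi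
    have hj : i = ((i.toNat : ℕ) : Int) := by omega
    set j := i.toNat with hjdef
    have hjn : j < nums.length := by omega
    rw [hj]
    rw [pyGetD_map_range' (fun j => orT (nums.take j)) (nums.length + 1) j (by omega)]
    rw [show (((j : ℕ) : Int) + 1) = (((j + 1 : ℕ)) : Int) by push_cast; ring]
    rw [pyGetD_map_range' (fun j => orS (nums.drop j)) (nums.length + 1) (j + 1) (by omega)]
    have hnum : PySem.List.pyGetD nums ((j : ℕ) : Int) 0 = nums[j] := by
      rw [PySem.List.pyGetD_natCast, List.getD_eq_getElem?_getD, List.getElem?_eq_getElem hjn]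
      rfl
    rw [hnum, core_identity nums j hjn]
    simp only [hnum]

-- ===== VERDICT (by name: the statement is the Claim_ definition above) =====
theorem maximumDeliciousness_spec : Claim_equal_maximumDeliciousness := by
  intro nums k _ hpre
  unfold Spec_maximumDeliciousness
  exact main_eq nums k hpre.1
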